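-- pv_equiv track=rewrite | github.com/lukeboxwalker/advent-of-code | year_2023/day_02/puzzle.py | game_possible_value
-- ===== SOURCE A (Python) =====
-- def game_possible_value(game):
--     for sets in game[1]:
--         for color in sets:
--             if color[1] == "red" and color[0] > 12:
--                 return 0
--             if color[1] == "green" and color[0] > 13:
--                 return 0
--             if color[1] == "blue" and color[0] > 14:
--                 return 0
--     return game[0]
-- ===== SOURCE B (Python) =====
-- def game_possible_value(game):
--     maxes = {}
--     for sets in game[1]:
--         for color in sets:
--             if color[0] > maxes.get(color[1], 0):
--                 maxes[color[1]] = color[0]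
--     if maxes.get("red", 0) > 12 or maxes.get("green", 0) > 13 or maxes.get("blue", 0) > 14:
--         return 0
--     return game[0]
-- ===== Notes on version B (the rewrite author's own statement) =====
-- stated objective: alternative
-- what changed: Replaces the early-returning nested scan with a reduce-to-table pass that records each color's maximum count in a dict, followed by one threshold check of the three known colors.
import Mathlib
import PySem

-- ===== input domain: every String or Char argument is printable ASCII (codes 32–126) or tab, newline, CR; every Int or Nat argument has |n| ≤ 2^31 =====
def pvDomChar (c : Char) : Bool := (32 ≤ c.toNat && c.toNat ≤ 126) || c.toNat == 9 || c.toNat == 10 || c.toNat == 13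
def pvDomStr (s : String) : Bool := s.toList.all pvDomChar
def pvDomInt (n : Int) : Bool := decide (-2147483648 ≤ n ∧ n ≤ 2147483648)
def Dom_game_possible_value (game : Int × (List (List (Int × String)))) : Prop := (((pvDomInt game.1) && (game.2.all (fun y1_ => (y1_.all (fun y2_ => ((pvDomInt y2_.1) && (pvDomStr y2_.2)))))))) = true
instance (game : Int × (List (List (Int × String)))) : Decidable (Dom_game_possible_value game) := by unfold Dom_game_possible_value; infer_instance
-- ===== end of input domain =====

-- B replaces A's early-returning nested scan by a max-per-color table plus one threshold check (objective: alternative decomposition).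

-- ===== PORT A =====
-- inner 'for color in sets' loop: true = the early 'return 0' fires
def pvAScan : List (Int × String) → Bool
  | [] => false
  | c :: rest =>
    if c.2 == "red" && 12 < c.1 then true
    else if c.2 == "green" && 13 < c.1 then true
    else if c.2 == "blue" && 14 < c.1 then true
    else pvAScan rest

-- outer 'for sets in game[1]' loop
def pvAOuter : List (List (Int × String)) → Bool
  | [] => false
  | s :: rest => if pvAScan s then true else pvAOuter rest

def game_possible_value (game : Int × (List (List (Int × String)))) : Int :=
  if pvAOuter game.2 then 0 else game.1

-- ===== PORT B =====
-- one entry of the max-building pass: maxes[color[1]] = color[0] if it is larger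
def pvBStep (d : PySem.Dict String Int) (c : Int × String) : PySem.Dict String Int :=
  if d.getD c.2 0 < c.1 then d.insert c.2 c.1 else d

def game_possible_value_alt (game : Int × (List (List (Int × String)))) : Int :=
  let maxes := game.2.foldl (fun d s => s.foldl pvBStep d) PySem.Dict.empty
  if 12 < maxes.getD "red" 0 || 13 < maxes.getD "green" 0 || 14 < maxes.getD "blue" 0 then 0
  else game.1

-- ===== PRECONDITION & SPEC =====
def Spec_game_possible_value (game : Int × (List (List (Int × String)))) (out : Int) : Prop := out = game_possible_value_alt game
instance (game : Int × (List (List (Int × String)))) (out : Int) : Decidable (Spec_game_possible_value game out) := by unfold Spec_game_possible_value; infer_instance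

-- ===== CLAIM (what is proved, stated in full; the proofs are below) =====
def Claim_equal_game_possible_value : Prop := ∀ (game : Int × (List (List (Int × String)))), Dom_game_possible_value game → Spec_game_possible_value game (game_possible_value game)

-- ===== LEMMAS AND PROOFS =====

theorem pvBStep_getD (d : PySem.Dict String Int) (c : Int × String) (k : String) (L : Int) :
    (L < (pvBStep d c).getD k 0) ↔ (L < d.getD k 0 ∨ (c.2 = k ∧ L < c.1)) := by
  unfold pvBStep
  split_ifs with h
  · simp only [PySem.Dict.getD_insert]
    by_cases hk : k = c.2
    · subst hk; simp; omega
    · simp [hk, Ne.symm hk]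
  · constructor
    · intro hL; exact Or.inl hL
    · rintro (hL | ⟨he, hc⟩)
      · exact hL
      · subst he; omega

theorem pvBFold_getD (s : List (Int × String)) (d : PySem.Dict String Int) (k : String) (L : Int) :
    (L < (s.foldl pvBStep d).getD k 0) ↔
      (L < d.getD k 0 ∨ s.any (fun c => c.2 == k && decide (L < c.1)) = true) := by
  induction s generalizing d with
  | nil => simp
  | cons c rest ih =>
    simp only [List.foldl_cons, List.any_cons]
    rw [ih, pvBStep_getD]
    simp [Bool.and_eq_true, or_assoc]

theorem pvBOuterFold_getD (l : List (List (Int × String))) (k : String) (L : Int) (hL : 0 ≤ L) :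
    (L < (l.foldl (fun d s => s.foldl pvBStep d) PySem.Dict.empty).getD k 0) ↔
      (l.any (fun s => s.any (fun c => c.2 == k && decide (L < c.1))) = true) := by
  suffices h : ∀ d : PySem.Dict String Int,
      (L < (l.foldl (fun (d : PySem.Dict String Int) (s : List (Int × String)) => s.foldl pvBStep d) d).getD k 0) ↔
      (L < d.getD k 0 ∨ l.any (fun s => s.any (fun c => c.2 == k && decide (L < c.1))) = true) by
    rw [h]; simp [PySem.Dict.getD_empty]; omega
  induction l with
  | nil => simp
  | cons s rest ih =>
    intro d
    simp only [List.foldl_cons, List.any_cons]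
    rw [ih, pvBFold_getD]
    simp [or_assoc]

theorem pvAScan_any (s : List (Int × String)) :
    pvAScan s = s.any (fun c =>
      (c.2 == "red" && decide (12 < c.1)) || (c.2 == "green" && decide (13 < c.1)) ||
      (c.2 == "blue" && decide (14 < c.1))) := by
  induction s with
  | nil => rfl
  | cons c rest ih =>
    unfold pvAScan
    split_ifs with h1 h2 h3 <;> simp_all

theorem pvAOuter_any (l : List (List (Int × String))) :
    pvAOuter l = l.any pvAScan := by
  induction l with
  | nil => rfl
  | cons s rest ih =>
    unfold pvAOuter
    split_ifs with h <;> simp_all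

-- ===== VERDICT (by name: the statement is the Claim_ definition above) =====
theorem game_possible_value_spec : Claim_equal_game_possible_value := by
  intro game _
  unfold Spec_game_possible_value game_possible_value game_possible_value_alt
  have hA := pvAOuter_any game.2
  have hR := pvBOuterFold_getD game.2 "red" 12 (by norm_num)
  have hG := pvBOuterFold_getD game.2 "green" 13 (by norm_num)
  have hB := pvBOuterFold_getD game.2 "blue" 14 (by norm_num)
  by_cases h : pvAOuter game.2 = true
  · -- A returns 0: some entry exceeds a limit, so some max exceeds its limit
    rw [if_pos h]
    rw [hA] at h
    simp only [List.any_eq_true, pvAScan_any, Bool.or_eq_true, Bool.and_eq_true,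
      beq_iff_eq, decide_eq_true_eq] at h
    simp only [List.any_eq_true, Bool.and_eq_true, beq_iff_eq,
      decide_eq_true_eq] at hR hG hB
    have : (12 < (game.2.foldl (fun d s => s.foldl pvBStep d) PySem.Dict.empty).getD "red" 0)
        ∨ (13 < (game.2.foldl (fun d s => s.foldl pvBStep d) PySem.Dict.empty).getD "green" 0)
        ∨ (14 < (game.2.foldl (fun d s => s.foldl pvBStep d) PySem.Dict.empty).getD "blue" 0) := by
      obtain ⟨s, hs, c, hc, hcase⟩ := h
      rcases hcase with (⟨he, hl⟩ | ⟨he, hl⟩) | ⟨he, hl⟩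
      · exact Or.inl (hR.mpr ⟨s, hs, c, hc, he, hl⟩)
      · exact Or.inr (Or.inl (hG.mpr ⟨s, hs, c, hc, he, hl⟩))
      · exact Or.inr (Or.inr (hB.mpr ⟨s, hs, c, hc, he, hl⟩))
    simp only []
    rcases this with h1 | h1 | h1 <;> simp [h1]
  · -- A falls through: no entry exceeds, so no max exceeds
    rw [if_neg h]
    rw [hA] at h
    simp only [List.any_eq_true, pvAScan_any, Bool.or_eq_true, Bool.and_eq_true,
      beq_iff_eq, decide_eq_true_eq, not_exists, not_or, not_and] at h
    simp only [List.any_eq_true, Bool.and_eq_true, beq_iff_eq,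
      decide_eq_true_eq] at hR hG hB
    have hnr : ¬ (12 < (game.2.foldl (fun d s => s.foldl pvBStep d) PySem.Dict.empty).getD "red" 0) := by
      rw [hR]; rintro ⟨s, hs, c, hc, he, hl⟩
      exact ((h s hs c hc).1.1 he) hl
    have hng : ¬ (13 < (game.2.foldl (fun d s => s.foldl pvBStep d) PySem.Dict.empty).getD "green" 0) := by
      rw [hG]; rintro ⟨s, hs, c, hc, he, hl⟩
      exact ((h s hs c hc).1.2 he) hl
    have hnb : ¬ (14 < (game.2.foldl (fun d s => s.foldl pvBStep d) PySem.Dict.empty).getD "blue" 0) := by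
      rw [hB]; rintro ⟨s, hs, c, hc, he, hl⟩
      exact ((h s hs c hc).2 he) hl
    simp [hnr, hng, hnb]
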